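-- pv_equiv track=rewrite | github.com/AmanRajbhar08/Python-Data-structures | String/1.3_change_char_in_str.py | replace_char_in_Str
-- ===== SOURCE A (Python) =====
-- def replace_char_in_Str(string,replace_char):
--     '''
--     def: function to replace a strings first occurance with $ expect the very first occurance
--     parameter: string, string needs to be replace
--     return : string with replaced char
--     '''
--     #empty string
--     new_string=''
--     #count for replacing char
--     count=0
--     #iterarting the stirng and replacing it
--     for _ in string:
--         if _ == replace_char:
--             count +=1
--             if count == 2:
--               new_string += "$"
--             else:
--              new_string += _
--
--         else:
--             new_string += _
--     return new_string
-- ===== SOURCE B (Python) =====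
-- def replace_char_in_Str(string, replace_char):
--     idxs = [i for i, c in enumerate(string) if c == replace_char]
--     if len(idxs) >= 2:
--         p = idxs[1]
--         return string[:p] + "$" + string[p+1:]
--     return string
-- ===== Notes on version B (the rewrite author's own statement) =====
-- stated objective: simpler
-- what changed: Replaces the accumulating counted loop by collecting match positions with one comprehension and splicing '$' in at the second position via a single slice expression (unchanged string returned as-is when there are fewer than two matches).
import Mathlib
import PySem

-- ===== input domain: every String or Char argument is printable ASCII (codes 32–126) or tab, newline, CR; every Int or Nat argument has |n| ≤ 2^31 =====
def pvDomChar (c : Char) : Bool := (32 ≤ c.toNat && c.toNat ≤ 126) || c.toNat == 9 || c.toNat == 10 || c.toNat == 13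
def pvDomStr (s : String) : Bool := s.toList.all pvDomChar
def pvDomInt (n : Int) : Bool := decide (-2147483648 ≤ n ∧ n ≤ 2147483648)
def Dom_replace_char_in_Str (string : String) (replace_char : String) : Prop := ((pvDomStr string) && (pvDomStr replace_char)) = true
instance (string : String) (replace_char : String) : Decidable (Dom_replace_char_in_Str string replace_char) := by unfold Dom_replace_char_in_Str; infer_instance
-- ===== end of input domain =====

-- B replaces A's counted accumulating loop by one comprehension of match positions plus a single slice splice (objective: simpler).


-- ===== PORT A =====
-- A: accumulate new_string and count over the characters of `string`;
-- `_ == replace_char` compares the 1-char string to replace_char.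
def replace_char_in_Str (string : String) (replace_char : String) : String :=
  let st := string.toList.foldl
    (fun (st : List Char × Int) c =>
      if String.ofList [c] == replace_char then
        let count := st.2 + 1
        if count = 2 then (st.1 ++ ['$'], count) else (st.1 ++ [c], count)
      else (st.1 ++ [c], st.2))
    ([], 0)
  String.ofList st.1

-- ===== PORT B =====
-- B: indices of matches via enumerate+filter; if ≥ 2 matches, splice '$' at the second.
def replace_char_in_Str_alt (string : String) (replace_char : String) : String :=
  let cs := string.toList
  let idxs := ((PySem.List.enumerate cs 0).filter
      (fun p => String.ofList [p.2] == replace_char)).map Prod.fst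
  if 2 ≤ idxs.length then
    let p := idxs[1]!
    String.ofList (PySem.List.slice cs none (some p) ++ ['$'] ++ PySem.List.slice cs (some (p + 1)) none)
  else string

-- ===== PRECONDITION & SPEC =====
def Spec_replace_char_in_Str (string : String) (replace_char : String) (out : String) : Prop := out = replace_char_in_Str_alt string replace_char
instance (string : String) (replace_char : String) (out : String) : Decidable (Spec_replace_char_in_Str string replace_char out) := by unfold Spec_replace_char_in_Str; infer_instance

-- ===== CLAIM (what is proved, stated in full; the proofs are below) =====
def Claim_equal_replace_char_in_Str : Prop := ∀ (string : String) (replace_char : String), Dom_replace_char_in_Str string replace_char → Spec_replace_char_in_Str string replace_char (replace_char_in_Str string replace_char)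

-- ===== LEMMAS AND PROOFS =====

-- A's loop as a structural recursion on the character list.
def pvAGo (m : Char → Bool) : List Char → Int → List Char
  | [], _ => []
  | x :: xs, k =>
    if m x then (if k + 1 = 2 then '$' else x) :: pvAGo m xs (k + 1)
    else x :: pvAGo m xs k

-- Nat-level match indices (B's idxs, shifted to Nat).
def pvIdxs (m : Char → Bool) : List Char → List Nat
  | [] => []
  | x :: xs => if m x then 0 :: (pvIdxs m xs).map (· + 1) else (pvIdxs m xs).map (· + 1)

theorem pvFoldl_eq_aGo (m : Char → Bool) (cs : List Char) :
    ∀ (acc : List Char) (k : Int),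
      (cs.foldl (fun (st : List Char × Int) c =>
        if m c then
          let count := st.2 + 1
          if count = 2 then (st.1 ++ ['$'], count) else (st.1 ++ [c], count)
        else (st.1 ++ [c], st.2)) (acc, k)).1 = acc ++ pvAGo m cs k := by
  induction cs with
  | nil => intro acc k; simp [pvAGo]
  | cons x xs ih =>
    intro acc k
    by_cases hx : m x
    · by_cases hk : k + 1 = 2 <;>
        simp [pvAGo, hx, hk, ih, List.append_assoc]
    · simp [pvAGo, hx, ih, List.append_assoc]

theorem pvAGo_ge_two (m : Char → Bool) (cs : List Char) :
    ∀ k : Int, 2 ≤ k → pvAGo m cs k = cs := by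
  induction cs with
  | nil => intro k _; simp [pvAGo]
  | cons x xs ih =>
    intro k hk
    by_cases hx : m x
    · have h2 : ¬ (k + 1 = 2) := by omega
      simp [pvAGo, hx, h2, ih (k + 1) (by omega)]
    · simp [pvAGo, hx, ih k hk]

theorem pvAGo_one (m : Char → Bool) (cs : List Char) :
    pvAGo m cs 1 = match pvIdxs m cs with
      | [] => cs
      | q :: _ => cs.take q ++ ['$'] ++ cs.drop (q + 1) := by
  induction cs with
  | nil => simp [pvAGo, pvIdxs]
  | cons x xs ih =>
    by_cases hx : m x
    · simp [pvAGo, pvIdxs, hx, pvAGo_ge_two m xs 2 (by omega)]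
    · simp only [pvAGo, pvIdxs, hx, Bool.false_eq_true, if_false]
      cases h : pvIdxs m xs with
      | nil => simp [h] at ih; simp [ih]
      | cons q t =>
        simp [h] at ih
        simp [ih, List.take_succ_cons, List.drop_succ_cons]

theorem pvAGo_zero (m : Char → Bool) (cs : List Char) :
    pvAGo m cs 0 = match pvIdxs m cs with
      | _ :: q :: _ => cs.take q ++ ['$'] ++ cs.drop (q + 1)
      | _ => cs := by
  induction cs with
  | nil => simp [pvAGo, pvIdxs]
  | cons x xs ih =>
    by_cases hx : m x
    · have h1 : pvAGo m (x :: xs) 0 = x :: pvAGo m xs 1 := by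
        simp [pvAGo, hx]
      rw [h1, pvAGo_one]
      cases h : pvIdxs m xs with
      | nil => simp [pvIdxs, hx, h]
      | cons q t =>
        simp [pvIdxs, hx, h, List.take_succ_cons, List.drop_succ_cons]
    · simp only [pvAGo, pvIdxs, hx, Bool.false_eq_true, if_false]
      cases h : pvIdxs m xs with
      | nil => simp [h] at ih; simp [ih]
      | cons a t =>
        cases t with
        | nil => simp [h] at ih; simp [ih]
        | cons b t' =>
          simp [h] at ih
          simp [ih, List.take_succ_cons, List.drop_succ_cons]

-- B's Int index list is the Nat-cast of pvIdxs.
theorem pvEnum_filter (m : Char → Bool) (cs : List Char) :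
    ∀ s : Int, ((PySem.List.enumerate cs s).filter (fun p => m p.2)).map Prod.fst
      = (pvIdxs m cs).map (fun n : Nat => (s + n : Int)) := by
  induction cs with
  | nil => intro s; simp [PySem.List.enumerate_nil, pvIdxs]
  | cons x xs ih =>
    intro s
    have hmap : ∀ l : List Nat,
        l.map (fun n : Nat => (s + 1 + n : Int))
          = (l.map (· + 1)).map (fun n : Nat => (s + n : Int)) := by
      intro l
      rw [List.map_map]
      exact List.map_congr_left (fun n _ => by simp; ring)
    by_cases hx : m x
    · rw [PySem.List.enumerate_cons, List.filter_cons]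
      simp only [hx, if_true, List.map_cons, ih (s + 1), ← hmap, pvIdxs]
      simp
    · rw [PySem.List.enumerate_cons, List.filter_cons]
      simp only [hx, Bool.false_eq_true, if_false, ih (s + 1), ← hmap, pvIdxs]

theorem replace_char_in_Str_eq_alt (string replace_char : String) :
    replace_char_in_Str string replace_char = replace_char_in_Str_alt string replace_char := by
  unfold replace_char_in_Str replace_char_in_Str_alt
  set m : Char → Bool := fun c => String.ofList [c] == replace_char with hm
  set cs := string.toList with hcs
  have hfold := pvFoldl_eq_aGo m cs [] 0
  have hidx := pvEnum_filter m cs 0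
  simp only
  rw [show (fun (p : Int × Char) => String.ofList [p.2] == replace_char) = (fun p => m p.2) from rfl,
    hidx]
  rw [show (fun (st : List Char × Int) c =>
      if String.ofList [c] == replace_char then
        let count := st.2 + 1
        if count = 2 then (st.1 ++ ['$'], count) else (st.1 ++ [c], count)
      else (st.1 ++ [c], st.2)) = (fun (st : List Char × Int) c =>
      if m c then
        let count := st.2 + 1
        if count = 2 then (st.1 ++ ['$'], count) else (st.1 ++ [c], count)
      else (st.1 ++ [c], st.2)) from rfl]
  rw [hfold, List.nil_append, pvAGo_zero]
  cases h : pvIdxs m cs with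
  | nil =>
    simp only [List.map_nil, List.length_nil]
    rw [if_neg (by omega)]
    exact String.ofList_toList (s := string)
  | cons a t =>
    cases t with
    | nil =>
      simp only [List.map_cons, List.map_nil, List.length_cons, List.length_nil]
      rw [if_neg (by omega)]
      exact String.ofList_toList (s := string)
    | cons b t' =>
      simp only [List.map_cons, List.length_cons]
      rw [if_pos (by omega)]
      have hb : (((0 : Int) + (a : Int)) :: ((0 : Int) + (b : Int)) ::
          (t'.map (fun n : Nat => ((0 : Int) + n : Int))))[1]! = ((0 : Int) + (b : Int)) := by
        simp
      rw [hb]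
      have h1 : PySem.List.slice cs none (some ((0 : Int) + (b : Int))) = cs.take b := by
        rw [show ((0 : Int) + (b : Int)) = ((b : Nat) : Int) by ring]
        exact PySem.List.slice_to_natCast cs b
      have h2 : PySem.List.slice cs (some ((0 : Int) + (b : Int) + 1)) none = cs.drop (b + 1) := by
        rw [show ((0 : Int) + (b : Int) + 1) = ((b + 1 : Nat) : Int) by push_cast; ring]
        exact PySem.List.slice_from_natCast cs (b + 1)
      rw [h1, h2]

-- ===== VERDICT (by name: the statement is the Claim_ definition above) =====
theorem replace_char_in_Str_spec : Claim_equal_replace_char_in_Str := by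
  intro string replace_char _
  unfold Spec_replace_char_in_Str
  exact replace_char_in_Str_eq_alt string replace_char
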